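-- pv_equiv track=rewrite | github.com/Guzz-T/python-luxtronik | luxtronik/data_vector.py | unpack_values
-- ===== SOURCE A (Python) =====
-- def unpack_values(packed, count, num_bits, reverse=True):
--     """
--     Unpacks 'count' chunks from a packed integer.
--
--     Args:
--         packed (int): Packed raw data as a single integer value.
--         count (int): Number of chunks to unpack.
--         num_bits (int): Number of bits per chunk.
--         reverse (bool): Use big-endian/MSB-first if true,
--             otherwise use little-endian/LSB-first order.
--
--     Returns:
--         list[int]: List of unpacked raw data values.
--
--     Note:
--         The smart home interface uses a chunk size of 16 bits.
--     """
--     values = []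
--     mask = (1 << num_bits) - 1
--
--     for idx in range(count):
--         # normal: idx = 0..n-1
--         # reversed: highest chunk first
--         bit_index = (count - 1 - idx) if reverse else idx
--
--         chunk = (packed >> (num_bits * bit_index)) & mask
--         values.append(chunk)
--
--     return values
-- ===== SOURCE B (Python) =====
-- def unpack_values(packed, count, num_bits, reverse=True):
--     """Unpack 'count' chunks of 'num_bits' bits from 'packed'.
--
--     Divide and conquer: split the packed integer into high/low halves with a
--     single shift per level, recursing until each piece is one chunk; once the
--     cursor is exhausted (0 or -1) all remaining chunks are pure sign fill.
--     Builds the LSB-first list, then reverses it for MSB-first order.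
--     """
--     mask = (1 << num_bits) - 1
--
--     def split(x, n):
--         # LSB-first list of the low n chunks of x (n >= 1)
--         if n == 1:
--             return [x & mask]
--         if x == 0 or x == -1:
--             return [x & mask] * n
--         h = n // 2
--         s = num_bits * h
--         high = x >> s
--         return split(x - (high << s), h) + split(high, n - h)
--
--     if count <= 0:
--         return []
--     values = split(packed, count)
--     if reverse:
--         values.reverse()
--     return values
-- ===== Notes on version B (the rewrite author's own statement) =====
-- stated objective: faster
-- what changed: A extracts each chunk by shifting the whole packed big-int once per index; B splits the packed integer recursively into high/low halves (one shift per level, with an early-out once the cursor is 0 or -1), producing the LSB-first chunk list and reversing it once for MSB-first order.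
import Mathlib
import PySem

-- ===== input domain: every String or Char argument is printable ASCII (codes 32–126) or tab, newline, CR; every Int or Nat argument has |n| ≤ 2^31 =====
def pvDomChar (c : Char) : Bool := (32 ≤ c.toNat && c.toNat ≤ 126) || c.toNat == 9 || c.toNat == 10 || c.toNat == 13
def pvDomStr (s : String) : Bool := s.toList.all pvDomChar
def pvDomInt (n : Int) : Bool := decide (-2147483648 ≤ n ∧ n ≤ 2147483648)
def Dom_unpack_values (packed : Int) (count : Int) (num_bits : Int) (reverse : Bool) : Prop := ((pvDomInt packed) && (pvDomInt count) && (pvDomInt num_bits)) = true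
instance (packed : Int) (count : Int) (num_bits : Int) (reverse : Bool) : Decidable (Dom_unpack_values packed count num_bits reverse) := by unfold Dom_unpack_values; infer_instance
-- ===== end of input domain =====

-- B replaces A's per-index shift of the whole packed integer by a divide-and-conquer
-- split (one shift/mask per half at each level), asymptotically faster on big inputs.

-- ===== PORT A =====
-- Literal port of A. '.toNat' on the shift amounts is exact on Pre_ (0 ≤ num_bits,
-- and bit_index ≥ 0 for every idx produced by range(count)).
def unpack_values (packed : Int) (count : Int) (num_bits : Int) (reverse : Bool) : List Int :=
  let mask : Int := ((1 : Int) <<< num_bits.toNat) - 1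
  (PySem.List.pyRange 0 count 1).foldl
    (fun values idx =>
      let bit_index : Int := if reverse then count - 1 - idx else idx
      values ++ [PySem.Int.band (packed >>> (num_bits * bit_index).toNat) mask])
    []

-- ===== PORT B =====
-- B's inner 'split(x, n)': LSB-first list of the low n chunks of x.
-- Python only ever calls it with n ≥ 1; Lean totality makes n = 0 take the n = 1 branch
-- (unreachable from unpack_values_alt, which guards count ≤ 0).
def pvSplit (num_bits : Int) (mask : Int) (x : Int) (n : Nat) : List Int :=
  if n ≤ 1 then [PySem.Int.band x mask]
  else if x = 0 ∨ x = -1 then List.replicate n (PySem.Int.band x mask)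
  else
    pvSplit num_bits mask
        (x - (x >>> (num_bits * ((n / 2 : Nat) : Int)).toNat)
              <<< (num_bits * ((n / 2 : Nat) : Int)).toNat) (n / 2)
      ++ pvSplit num_bits mask (x >>> (num_bits * ((n / 2 : Nat) : Int)).toNat) (n - n / 2)
termination_by n
decreasing_by all_goals omega

def unpack_values_alt (packed : Int) (count : Int) (num_bits : Int) (reverse : Bool) : List Int :=
  let mask : Int := ((1 : Int) <<< num_bits.toNat) - 1
  if count ≤ 0 then []
  else
    let values := pvSplit num_bits mask packed count.toNat
    if reverse then values.reverse else values

-- ===== PRECONDITION & SPEC =====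
-- Pre_ excludes num_bits < 0, on which Python A (and B) raise ValueError at '1 << num_bits'.
def Pre_unpack_values (packed : Int) (count : Int) (num_bits : Int) (reverse : Bool) : Prop :=
  0 ≤ num_bits
instance (packed : Int) (count : Int) (num_bits : Int) (reverse : Bool) : Decidable (Pre_unpack_values packed count num_bits reverse) := by unfold Pre_unpack_values; infer_instance

def pvWitness_unpack_values : Int × Int × Int × Bool := (45, 2, 3, true)

def Spec_unpack_values (packed : Int) (count : Int) (num_bits : Int) (reverse : Bool) (out : List Int) : Prop := out = unpack_values_alt packed count num_bits reverse
instance (packed : Int) (count : Int) (num_bits : Int) (reverse : Bool) (out : List Int) : Decidable (Spec_unpack_values packed count num_bits reverse out) := by unfold Spec_unpack_values; infer_instance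

-- ===== CLAIM (what is proved, stated in full; the proofs are below) =====
def Claim_equal_unpack_values : Prop := ∀ (packed : Int) (count : Int) (num_bits : Int) (reverse : Bool), Dom_unpack_values packed count num_bits reverse → Pre_unpack_values packed count num_bits reverse → Spec_unpack_values packed count num_bits reverse (unpack_values packed count num_bits reverse)

-- ===== LEMMAS AND PROOFS =====

-- the k-th 'num_bits'-wide chunk of x (LSB-first), as plain arithmetic
def pvChunk (N : Nat) (x : Int) (k : Nat) : Int := (x / 2 ^ (N * k)) % 2 ^ N

-- Python's  x & ((1 << n) - 1)  is  x % 2^n, also for negative x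
lemma pv_band_mask (y : Int) (n : Nat) : PySem.Int.band y (2 ^ n - 1) = y % 2 ^ n := by
  have h1 : (0:Int) < 2 ^ n := by positivity
  have h1n : (0:Nat) < 2 ^ n := by positivity
  have hcast : ((2 ^ n : Nat) : Int) = 2 ^ n := by push_cast; ring
  unfold PySem.Int.band
  by_cases hy : 0 ≤ y
  · have hb : (0:Int) ≤ 2 ^ n - 1 := by omega
    simp only [hy, hb, if_true]
    have ht : ((2:Int) ^ n - 1).toNat = 2 ^ n - 1 := by omega
    rw [ht, Nat.and_two_pow_sub_one_eq_mod]
    have hyy : y = ((y.toNat : Nat) : Int) := by omega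
    rw [Int.natCast_mod, hcast, ← hyy]
  · have hb : (0:Int) ≤ 2 ^ n - 1 := by omega
    simp only [hy, hb, if_true, if_false]
    have ht : ((2:Int) ^ n - 1).toNat = 2 ^ n - 1 := by omega
    rw [ht]
    set m : Nat := (-y - 1).toNat with hm
    have hym : y = -(m : Int) - 1 := by omega
    rw [Nat.and_comm, Nat.and_two_pow_sub_one_eq_mod]
    have hr : m % 2 ^ n < 2 ^ n := Nat.mod_lt _ h1n
    have hdm : 2 ^ n * (m / 2 ^ n) + m % 2 ^ n = m := Nat.div_add_mod m (2 ^ n)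
    have hxrep : y = ((2:Int) ^ n - 1 - (m % 2 ^ n : Nat)) + (-(m / 2 ^ n : Nat) - 1) * 2 ^ n := by
      rw [hym]
      have := congrArg (fun t : Nat => (t : Int)) hdm
      push_cast at this ⊢
      linarith
    rw [hxrep, Int.add_mul_emod_self_right, Int.emod_eq_of_lt (by omega) (by omega)]
    omega

-- the low-bits mask commutes with chunk extraction below the cut
lemma pvChunk_low (N : Nat) (x : Int) (h k : Nat) (hk : k < h) :
    pvChunk N (x % 2 ^ (N * h)) k = pvChunk N x k := by
  unfold pvChunk
  obtain ⟨d, rfl⟩ : ∃ d, h = k + 1 + d := ⟨h - k - 1, by omega⟩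
  have hsplit : (2:Int) ^ (N * (k + 1 + d)) = 2 ^ (N * k) * 2 ^ N * 2 ^ (N * d) := by
    rw [← pow_add, ← pow_add]; ring_nf
  rw [hsplit]
  set P : Int := 2 ^ (N * k) with hP
  set Q : Int := 2 ^ N with hQ
  set R : Int := 2 ^ (N * d) with hR
  have hP0 : P ≠ 0 := by positivity
  have hx : x = x % (P * Q * R) + (Q * R * (x / (P * Q * R))) * P := by
    have := Int.emod_add_ediv x (P * Q * R); linarith [this]
  have hdiv : x / P = x % (P * Q * R) / P + Q * R * (x / (P * Q * R)) := by
    conv_lhs => rw [hx]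
    rw [Int.add_mul_ediv_right _ _ hP0]
  rw [hdiv]
  have : x % (P * Q * R) / P + Q * R * (x / (P * Q * R))
       = x % (P * Q * R) / P + (R * (x / (P * Q * R))) * Q := by ring
  rw [this, Int.add_mul_emod_self_right]

-- shifting the cursor right moves the chunk index up
lemma pvChunk_high (N : Nat) (x : Int) (h k : Nat) :
    pvChunk N (x / 2 ^ (N * h)) k = pvChunk N x (h + k) := by
  unfold pvChunk
  rw [Int.ediv_ediv_of_nonneg (show (0:Int) ≤ 2 ^ (N * h) by positivity), ← pow_add]
  have he : N * h + N * k = N * (h + k) := by ring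
  rw [he]

-- the 1<<n mask literal
lemma pv_shl_mask (n : Nat) : (1:Int) <<< n - 1 = 2 ^ n - 1 := by
  rw [Int.shiftLeft_eq, one_mul]

-- pvSplit returns exactly the LSB-first chunk list
lemma pv_neg_one_ediv (m : Nat) : (-1 : Int) / 2 ^ m = -1 := by
  have h : (0:Int) < 2 ^ m := by positivity
  have hrep : (-1 : Int) = (2 ^ m - 1) + (-1) * 2 ^ m := by ring
  conv_lhs => rw [hrep]
  rw [Int.add_mul_ediv_right _ _ (ne_of_gt h), Int.ediv_eq_zero_of_lt (by omega) (by omega)]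
  norm_num

lemma pvSplit_eq_map (N : Nat) (x : Int) (n : Nat) (hn : 1 ≤ n) :
    pvSplit (N : Int) (2 ^ N - 1) x n = (List.range n).map (pvChunk N x) := by
  induction n using Nat.strong_induction_on generalizing x with
  | _ n ih =>
    rw [pvSplit]
    by_cases h1 : n ≤ 1
    · have hn1 : n = 1 := by omega
      subst hn1
      rw [if_pos (by omega), pv_band_mask]
      simp [pvChunk]
    · rw [if_neg h1]
      by_cases hx : x = 0 ∨ x = -1
      · rw [if_pos hx, pv_band_mask]
        symm
        rw [List.eq_replicate_iff]
        refine ⟨by simp, ?_⟩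
        intro b hb
        obtain ⟨k, hk, rfl⟩ := List.mem_map.mp hb
        unfold pvChunk
        rcases hx with rfl | rfl
        · simp
        · rw [pv_neg_one_ediv]
      · rw [if_neg hx]
        have hh1 : 1 ≤ n / 2 := by omega
        have hh2 : 1 ≤ n - n / 2 := by omega
        have htn : ((N : Int) * ((n / 2 : Nat) : Int)).toNat = N * (n / 2) := by
          rw [← Nat.cast_mul, Int.toNat_natCast]
        have hlow : x - (x >>> (N * (n / 2))) <<< (N * (n / 2)) = x % 2 ^ (N * (n / 2)) := by
          rw [Int.shiftRight_eq_div_pow, Int.shiftLeft_eq, Nat.cast_pow, Nat.cast_ofNat,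
              Int.emod_def]
          ring
        rw [htn, hlow, ih (n / 2) (by omega) _ hh1,
            Int.shiftRight_eq_div_pow, Nat.cast_pow, Nat.cast_ofNat,
            ih (n - n / 2) (by omega) _ hh2]
        have hmr : n = n / 2 + (n - n / 2) := by omega
        conv_rhs => rw [hmr, List.range_add, List.map_append]
        congr 1
        · exact List.map_congr_left fun k hk =>
            pvChunk_low N x (n / 2) k (List.mem_range.mp hk)
        · rw [List.map_map]
          exact List.map_congr_left fun k _ => pvChunk_high N x (n / 2) k

-- append-fold is map
lemma pv_foldl_append_map {α β : Type} (l : List α) (g : α → β) (init : List β) :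
    l.foldl (fun vs x => vs ++ [g x]) init = init ++ l.map g := by
  induction l generalizing init with
  | nil => simp
  | cons a t ih => simp [ih]

-- reversing a map over range
lemma pv_map_range_reverse {β : Type} (f : Nat → β) (m : Nat) :
    ((List.range m).map f).reverse = (List.range m).map (fun k => f (m - 1 - k)) := by
  have h : (List.range m).reverse = (List.range m).map (fun i => 0 + m - 1 - i) := by
    rw [List.range_eq_range', List.reverse_range', ← List.range_eq_range']
  rw [← List.map_reverse, h, List.map_map]
  exact List.map_congr_left fun k _ => by simp

-- A returns the chunk list, MSB-first when reverse
lemma pv_A_eq (packed : Int) (count : Int) (N : Nat) (reverse : Bool) :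
    unpack_values packed count (N : Int) reverse =
      (if reverse
        then ((List.range count.toNat).map (pvChunk N packed)).reverse
        else (List.range count.toNat).map (pvChunk N packed)) := by
  unfold unpack_values
  rw [PySem.List.pyRange_one]
  simp only [sub_zero, Int.toNat_natCast]
  rw [List.foldl_map, pv_foldl_append_map, List.nil_append, pv_shl_mask]
  cases reverse with
  | false =>
    simp only [Bool.false_eq_true, if_false]
    exact List.map_congr_left fun k _ => by
      have ht : ((N : Int) * (0 + (k : Int))).toNat = N * k := by
        rw [zero_add, ← Nat.cast_mul, Int.toNat_natCast]
      rw [ht, pv_band_mask, Int.shiftRight_eq_div_pow]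
      simp [pvChunk]
  | true =>
    simp only [if_true]
    rw [pv_map_range_reverse]
    exact List.map_congr_left fun k hk => by
      have hk' : k < count.toNat := List.mem_range.mp hk
      have hc : count - 1 - (0 + (k : Int)) = ((count.toNat - 1 - k : Nat) : Int) := by omega
      have ht : ((N : Int) * ((count.toNat - 1 - k : Nat) : Int)).toNat
          = N * (count.toNat - 1 - k) := by rw [← Nat.cast_mul, Int.toNat_natCast]
      rw [hc, ht, pv_band_mask, Int.shiftRight_eq_div_pow]
      simp [pvChunk]

-- ===== VERDICT (by name: the statement is the Claim_ definition above) =====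
theorem unpack_values_spec : Claim_equal_unpack_values := by
  intro packed count num_bits reverse _ hpre
  unfold Spec_unpack_values
  have h0 : 0 ≤ num_bits := hpre
  obtain ⟨N, rfl⟩ : ∃ N : Nat, num_bits = (N : Int) :=
    ⟨num_bits.toNat, by omega⟩
  rw [pv_A_eq]
  unfold unpack_values_alt
  by_cases hc : count ≤ 0
  · simp only [hc, if_true]
    have : count.toNat = 0 := by omega
    simp [this]
  · simp only [hc, if_false]
    rw [Int.toNat_natCast, pv_shl_mask, pvSplit_eq_map N packed count.toNat (by omega)]
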